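-- pv_equiv track=rewrite | github.com/hahyuning/Coding-test-study | problem_solving/2022/03/220326/220326_4.py | solution
-- ===== SOURCE A (Python) =====
-- def solution(arr, brr):
--     ans = 0
--     for i in range(len(arr) - 1):
--         x = arr[i]
--         y = brr[i]
--         if x == y:
--             continue
--
--         ans += 1
--         if x < y:
--             diff = y - x
--             arr[i + 1] -= diff
--         else:
--             diff = x - y
--             arr[i + 1] += diff
--
--     return ans
-- ===== SOURCE B (Python) =====
-- def solution(arr, brr):
--     # Return-value equivalence only: A mutates arr in place; B does not.
--     # Observation: A's branches both amount to arr[i+1] += arr[i] - brr[i],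
--     # so the propagated value at i is the prefix sum S_i = sum_{j<=i}(arr[j]-brr[j]),
--     # and the answer is the number of nonzero S_i for i < len(arr)-1.
--     ans = 0
--     s = 0
--     for i in range(len(arr) - 1):
--         s += arr[i] - brr[i]
--         if s != 0:
--             ans += 1
--     return ans
-- ===== Notes on version B (the rewrite author's own statement) =====
-- stated objective: simpler
-- what changed: B replaces A's branchy in-place propagation through arr (compare, compute diff, mutate arr[i+1]) with a single running prefix sum s of arr[j]-brr[j], counting the indices where s is nonzero; arr is not mutated (return-value equivalence).
import Mathlib
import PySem

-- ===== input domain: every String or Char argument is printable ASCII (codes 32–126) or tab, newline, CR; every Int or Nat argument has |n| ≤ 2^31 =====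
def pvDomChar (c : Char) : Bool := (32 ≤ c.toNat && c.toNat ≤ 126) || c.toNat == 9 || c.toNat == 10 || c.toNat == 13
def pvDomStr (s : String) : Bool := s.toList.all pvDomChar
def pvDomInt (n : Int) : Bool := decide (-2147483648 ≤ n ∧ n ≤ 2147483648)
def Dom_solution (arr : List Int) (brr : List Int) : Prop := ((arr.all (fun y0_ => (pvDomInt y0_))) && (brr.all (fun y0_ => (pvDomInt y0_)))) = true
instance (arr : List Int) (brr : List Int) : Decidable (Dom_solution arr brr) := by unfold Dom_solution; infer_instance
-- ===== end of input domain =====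

-- B counts nonzero running prefix sums of arr[i]-brr[i] instead of A's branchy in-place
-- propagation through arr (simpler; return-value equivalence only — A mutates arr, B does not).


-- ===== PORT A =====
-- loop body of A: state (arr, ans); total forms pyGetD/pySetD are in range under Pre_solution
def stepA (brr : List Int) (st : List Int × Int) (i : Int) : List Int × Int :=
  let a := st.1
  let ans := st.2
  let x := PySem.List.pyGetD a i 0
  let y := PySem.List.pyGetD brr i 0
  if x = y then (a, ans)
  else if x < y then
    let diff := y - x
    (PySem.List.pySetD a (i+1) (PySem.List.pyGetD a (i+1) 0 - diff), ans + 1)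
  else
    let diff := x - y
    (PySem.List.pySetD a (i+1) (PySem.List.pyGetD a (i+1) 0 + diff), ans + 1)

def solution (arr : List Int) (brr : List Int) : Int :=
  ((PySem.List.pyRange 0 ((arr.length : Int) - 1) 1).foldl (stepA brr) (arr, 0)).2

-- ===== PORT B =====
-- loop body of B: state (ans, s)
def stepB (arr : List Int) (brr : List Int) (st : Int × Int) (i : Int) : Int × Int :=
  let s := st.2 + PySem.List.pyGetD arr i 0 - PySem.List.pyGetD brr i 0
  (if s ≠ 0 then st.1 + 1 else st.1, s)

def solution_alt (arr : List Int) (brr : List Int) : Int :=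
  ((PySem.List.pyRange 0 ((arr.length : Int) - 1) 1).foldl (stepB arr brr) (0, 0)).1

-- ===== PRECONDITION & SPEC =====
-- Pre_ excludes exactly the inputs where both Pythons raise IndexError on brr[i]
-- (brr shorter than len(arr)-1).
def Pre_solution (arr : List Int) (brr : List Int) : Prop := arr.length ≤ brr.length + 1
instance (arr : List Int) (brr : List Int) : Decidable (Pre_solution arr brr) := by unfold Pre_solution; infer_instance
def pvWitness_solution : List Int × List Int := ([1, 3, 2], [2, 1, 2])
def Spec_solution (arr : List Int) (brr : List Int) (out : Int) : Prop := out = solution_alt arr brr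
instance (arr : List Int) (brr : List Int) (out : Int) : Decidable (Spec_solution arr brr out) := by unfold Spec_solution; infer_instance

-- ===== CLAIM (what is proved, stated in full; the proofs are below) =====
def Claim_equal_solution : Prop := ∀ (arr : List Int) (brr : List Int), Dom_solution arr brr → Pre_solution arr brr → Spec_solution arr brr (solution arr brr)

-- ===== LEMMAS AND PROOFS =====

-- Invariant after the first m iterations: the two answers agree, A's working list keeps
-- arr's length, its entry at index m is arr[m] + s (s = B's running prefix sum), and
-- every entry past m is still arr's.
theorem inv_lemma (arr brr : List Int) (hpre : arr.length ≤ brr.length + 1)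
    (m : Nat) (hm : m ≤ arr.length - 1) :
    let A := (PySem.List.pyRange 0 (m : Int) 1).foldl (stepA brr) (arr, 0)
    let B := (PySem.List.pyRange 0 (m : Int) 1).foldl (stepB arr brr) (0, 0)
    A.2 = B.1 ∧ A.1.length = arr.length ∧
      (∀ k : Nat, m ≤ k →
        A.1.getD k 0 = if k = m then arr.getD k 0 + B.2 else arr.getD k 0) := by
  induction m with
  | zero =>
      rw [show ((0 : Nat) : Int) = 0 from rfl, PySem.List.pyRange_one_eq_nil (le_refl 0)]
      refine ⟨rfl, rfl, ?_⟩
      intro k hk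
      split <;> simp
  | succ n ih =>
      have hn : n ≤ arr.length - 1 := by omega
      have hlen : n + 1 < arr.length := by omega
      have hbr : n < brr.length := by omega
      obtain ⟨h1, h2, h3⟩ := ih hn
      have hsplit : PySem.List.pyRange 0 ((n + 1 : Nat) : Int) 1
          = PySem.List.pyRange 0 (n : Int) 1 ++ [(n : Int)] := by
        push_cast
        exact PySem.List.pyRange_one_succ_right (by positivity)
      rw [hsplit, List.foldl_append, List.foldl_append]
      set A := (PySem.List.pyRange 0 (n : Int) 1).foldl (stepA brr) (arr, 0) with hA
      set B := (PySem.List.pyRange 0 (n : Int) 1).foldl (stepB arr brr) (0, 0) with hB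
      simp only [List.foldl_cons, List.foldl_nil]
      have hxa : PySem.List.pyGetD A.1 (n : Int) 0 = arr.getD n 0 + B.2 := by
        rw [PySem.List.pyGetD_natCast]
        simpa using h3 n (le_refl n)
      have hya : PySem.List.pyGetD brr (n : Int) 0 = brr.getD n 0 := by
        rw [PySem.List.pyGetD_natCast]
      have hnext : PySem.List.pyGetD A.1 ((n : Int) + 1) 0 = arr.getD (n + 1) 0 := by
        rw [show ((n : Int) + 1) = ((n + 1 : Nat) : Int) by push_cast; ring,
          PySem.List.pyGetD_natCast]
        simpa using h3 (n + 1) (by omega)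
      by_cases hxy : arr.getD n 0 + B.2 = brr.getD n 0
      · -- x = y : A leaves its list unchanged, B's new running sum is 0
        have hstepA : stepA brr A (n : Int) = (A.1, A.2) := by
          simp only [stepA, hxa, hya, if_pos hxy]
        have hs0 : B.2 + PySem.List.pyGetD arr (n : Int) 0
            - PySem.List.pyGetD brr (n : Int) 0 = 0 := by
          rw [PySem.List.pyGetD_natCast, PySem.List.pyGetD_natCast]
          omega
        have hstepB : stepB arr brr B (n : Int) = (B.1, 0) := by
          simp only [stepB, hs0]
          simp
        rw [hstepA, hstepB]
        refine ⟨h1, h2, ?_⟩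
        intro k hk
        rw [h3 k (by omega), if_neg (by omega)]
        split <;> simp
      · -- x ≠ y : A updates index n+1 by x - y; B's new running sum is x - y ≠ 0
        have hs' : B.2 + PySem.List.pyGetD arr (n : Int) 0
            - PySem.List.pyGetD brr (n : Int) 0
            = arr.getD n 0 + B.2 - brr.getD n 0 := by
          rw [PySem.List.pyGetD_natCast, PySem.List.pyGetD_natCast]
          ring
        have hne : arr.getD n 0 + B.2 - brr.getD n 0 ≠ 0 := by omega
        have hstepB : stepB arr brr B (n : Int)
            = (B.1 + 1, arr.getD n 0 + B.2 - brr.getD n 0) := by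
          simp only [stepB, hs']
          rw [if_pos hne]
        have hnewval : stepA brr A (n : Int)
            = (PySem.List.pySetD A.1 ((n : Int) + 1)
                (arr.getD (n + 1) 0 + (arr.getD n 0 + B.2 - brr.getD n 0)), A.2 + 1) := by
          simp only [stepA, hxa, hya, hnext]
          rw [if_neg hxy]
          rcases lt_or_gt_of_ne hxy with hlt | hgt
          · rw [if_pos hlt,
              show arr.getD (n + 1) 0 - (brr.getD n 0 - (arr.getD n 0 + B.2))
                = arr.getD (n + 1) 0 + (arr.getD n 0 + B.2 - brr.getD n 0) by ring]
          · rw [if_neg (not_lt.mpr (le_of_lt hgt))]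
        rw [hnewval, hstepB]
        have hsetn : ((n : Int) + 1) = ((n + 1 : Nat) : Int) := by push_cast; ring
        rw [hsetn, PySem.List.pySetD_natCast]
        refine ⟨by rw [h1], by rw [List.length_set]; exact h2, ?_⟩
        intro k hk
        by_cases hkeq : k = n + 1
        · subst hkeq
          rw [List.getD_eq_getElem?_getD,
            List.getElem?_set_self (by omega),
            Option.getD_some, if_pos rfl]
        · rw [List.getD_eq_getElem?_getD,
            List.getElem?_set_ne (show n + 1 ≠ k by omega),
            ← List.getD_eq_getElem?_getD, h3 k (by omega),
            if_neg (by omega), if_neg hkeq]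

-- ===== VERDICT (by name: the statement is the Claim_ definition above) =====
theorem solution_spec : Claim_equal_solution := by
  intro arr brr _hdom hpre
  unfold Spec_solution solution solution_alt
  cases arr with
  | nil =>
      rw [show ((([] : List Int).length : Int) - 1) = -1 by simp,
        PySem.List.pyRange_one_eq_nil (by norm_num)]
      rfl
  | cons a as =>
      have h0 : (((a :: as).length : Int) - 1) = (((a :: as).length - 1 : Nat) : Int) := by
        simp
      rw [h0]
      exact (inv_lemma (a :: as) brr hpre ((a :: as).length - 1) (le_refl _)).1
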